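-- pv_equiv track=rewrite | github.com/ArayikKarapetyan/ROSALIND | 034) Error Correction in Reads/python_efficient.py | correct_errors_efficient
-- ===== SOURCE A (Python) =====
-- from collections import Counter, defaultdict
--
-- def reverse_complement(dna):
--     """Fast reverse complement using translation table."""
--     trans = str.maketrans('ACGT', 'TGCA')
--     return dna.translate(trans)[::-1]
--
-- def correct_errors_efficient(reads):
--     """Efficient error correction using frequency counting and neighbor checking."""
--     # Count frequencies
--     freq = Counter()
--     for read in reads:
--         freq[read] += 1
--         freq[reverse_complement(read)] += 1
--
--     # Identify correct reads (total count >= 2)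
--     correct = {read for read, count in freq.items() if count >= 2}
--
--     # Create a set for O(1) lookups
--     correct_set = set(correct)
--
--     # Precompute all possible single mutations for correct reads
--     mutation_map = defaultdict(list)
--     for correct_read in correct:
--         seq = correct_read
--         # Generate all single mutations
--         for i in range(len(seq)):
--             for base in 'ACGT':
--                 if seq[i] != base:
--                     mutation = seq[:i] + base + seq[i+1:]
--                     mutation_map[mutation].append(correct_read)
--
--     # Find corrections
--     corrections = []
--     seen = set()
--
--     for read in reads:
--         if read in correct_set:
--             continue
--
--         # Check if this read has exactly one correction
--         if read in mutation_map:
--             possible_corrections = mutation_map[read]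
--
--             # Filter only those where reverse complement is also considered
--             valid_corrections = []
--             for corr in possible_corrections:
--                 if corr in correct_set or reverse_complement(corr) in correct_set:
--                     valid_corrections.append(corr)
--
--             # Should have exactly one valid correction
--             if len(valid_corrections) == 1:
--                 correction = f"{read}->{valid_corrections[0]}"
--                 if correction not in seen:
--                     corrections.append(correction)
--                     seen.add(correction)
--
--     return corrections
-- ===== SOURCE B (Python) =====
-- def correct_errors_efficient(reads):
--     """Error correction by direct neighbour scan over the frequent strings."""
--     comp = {'A': 'T', 'C': 'G', 'G': 'C', 'T': 'A'}
--     bases = ['A', 'C', 'G', 'T']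
--
--     def rc(s):
--         return ''.join(comp.get(ch, ch) for ch in reversed(s))
--
--     def one_sub(c, r):
--         """True iff r is c with exactly one position substituted by a base."""
--         if len(c) != len(r):
--             return False
--         return any(c[:i] == r[:i] and c[i] != r[i] and r[i] in bases
--                    and c[i + 1:] == r[i + 1:]
--                    for i in range(len(c)))
--
--     pool = [s for read in reads for s in (read, rc(read))]
--     correct = [s for s in dict.fromkeys(pool) if pool.count(s) >= 2]
--
--     corrections = []
--     seen = set()
--     for read in reads:
--         if read in correct:
--             continue
--         neighbours = [c for c in correct if one_sub(c, read)]
--         if len(neighbours) == 1: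
--             correction = f"{read}->{neighbours[0]}"
--             if correction not in seen:
--                 corrections.append(correction)
--                 seen.add(correction)
--     return corrections
-- ===== Notes on version B (the rewrite author's own statement) =====
-- stated objective: simpler
-- what changed: Replaces the precomputed single-mutation multimap (and its redundant reverse-complement re-filter) with a direct scan: for each infrequent read, filter the frequent strings for the unique one obtainable by a single base substitution; frequency counting is done by deduplicating and counting the read+revcomp pool instead of an incremental Counter.
import Mathlib
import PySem

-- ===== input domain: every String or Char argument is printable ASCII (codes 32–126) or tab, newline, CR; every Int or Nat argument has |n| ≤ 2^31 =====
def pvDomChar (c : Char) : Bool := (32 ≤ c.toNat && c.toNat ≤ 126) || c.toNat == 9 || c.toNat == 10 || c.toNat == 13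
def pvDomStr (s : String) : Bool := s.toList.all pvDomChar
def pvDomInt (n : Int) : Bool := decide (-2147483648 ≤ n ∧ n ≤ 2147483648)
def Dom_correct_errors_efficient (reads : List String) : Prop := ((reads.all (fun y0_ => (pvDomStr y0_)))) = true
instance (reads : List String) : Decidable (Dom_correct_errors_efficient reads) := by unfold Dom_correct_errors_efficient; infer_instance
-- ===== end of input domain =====

-- B replaces A's precomputed single-mutation multimap by a direct neighbour scan over the
-- frequent strings (and counts the read+revcomp pool by dedup+count): simpler, same results.


-- ===== PORT A =====

-- str.maketrans('ACGT', 'TGCA') / str.translate: an exact per-character substitution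
def pvTransA (c : Char) : Char :=
  if c = 'A' then 'T' else if c = 'C' then 'G' else if c = 'G' then 'C' else if c = 'T' then 'A' else c

-- dna.translate(trans)[::-1]; [::-1] is reversal (PySem.Str.slice?_none_none_neg_one)
def reverse_complementA (dna : String) : String :=
  String.ofList ((dna.toList.map pvTransA).reverse)

-- the chars of the Python string literal 'ACGT'
def pvACGT : List Char := ['A', 'C', 'G', 'T']

-- freq = Counter(); for read in reads: freq[read] += 1; freq[reverse_complement(read)] += 1
def pvFreqA (reads : List String) : PySem.Dict String Int :=
  reads.foldl
    (fun d read => (d.modify read 0 (· + 1)).modify (reverse_complementA read) 0 (· + 1))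
    PySem.Dict.empty

-- correct = {read for read, count in freq.items() if count >= 2}
def pvCorrectA (reads : List String) : PySem.Set String :=
  PySem.Set.ofList ((((pvFreqA reads).items).filter (fun p => decide ((2 : Int) ≤ p.2))).map Prod.fst)

-- mutation = seq[:i] + base + seq[i+1:]  (string slicing/concat done on the char list, exact)
def pvMutA (seq : List Char) (i : Int) (base : Char) : String :=
  String.ofList (PySem.List.slice seq none (some i) ++ [base] ++ PySem.List.slice seq (some (i + 1)) none)

-- mutation_map = defaultdict(list); nested loops appending correct_read
def pvMutMapA (correct : List String) : PySem.Dict String (List String) :=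
  correct.foldl
    (fun d correct_read =>
      (PySem.List.pyRange 0 (PySem.Str.len correct_read) 1).foldl
        (fun d i =>
          pvACGT.foldl
            (fun d base =>
              if PySem.List.pyGetD correct_read.toList i ' ' ≠ base then
                d.modify (pvMutA correct_read.toList i base) [] (· ++ [correct_read])
              else d)
            d)
        d)
    PySem.Dict.empty

def correct_errors_efficient (reads : List String) : List String :=
  let correct := pvCorrectA reads
  let correct_set := PySem.Set.ofList correct
  let mutation_map := pvMutMapA correct
  (reads.foldl
    (fun (st : List String × PySem.Set String) read =>
      if PySem.Set.contains correct_set read then st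
      else if mutation_map.contains read then
        let possible := mutation_map.getD read []
        let valid := possible.foldl
          (fun acc corr =>
            if PySem.Set.contains correct_set corr
                || PySem.Set.contains correct_set (reverse_complementA corr) then
              acc ++ [corr]
            else acc)
          []
        if valid.length = 1 then
          let correction := read ++ "->" ++ PySem.List.pyGetD valid 0 ""
          if PySem.Set.contains st.2 correction then st
          else (st.1 ++ [correction], PySem.Set.add st.2 correction)
        else st
      else st)
    ([], PySem.Set.empty)).1

-- ===== PORT B =====

-- comp = {'A': 'T', 'C': 'G', 'G': 'C', 'T': 'A'}
def pvCompB : PySem.Dict Char Char :=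
  PySem.Dict.ofList [('A', 'T'), ('C', 'G'), ('G', 'C'), ('T', 'A')]

-- ''.join(comp.get(ch, ch) for ch in reversed(s))
def pvRcB (s : String) : String :=
  String.ofList (s.toList.reverse.map (fun ch => pvCompB.getD ch ch))

-- one_sub(c, r): length guard, then any over i of prefix/char/base/suffix conditions
def pvOneSubB (c r : String) : Bool :=
  if PySem.Str.len c ≠ PySem.Str.len r then false
  else
    (PySem.List.pyRange 0 (PySem.Str.len c) 1).any (fun i =>
      (PySem.List.slice c.toList none (some i) == PySem.List.slice r.toList none (some i))
      && (PySem.List.pyGetD c.toList i ' ' != PySem.List.pyGetD r.toList i ' ')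
      && ['A', 'C', 'G', 'T'].contains (PySem.List.pyGetD r.toList i ' ')  -- bases = ['A','C','G','T']
      && (PySem.List.slice c.toList (some (i + 1)) none
            == PySem.List.slice r.toList (some (i + 1)) none))

def correct_errors_efficient_alt (reads : List String) : List String :=
  let pool := reads.flatMap (fun read => [read, pvRcB read])
  let correct := (PySem.List.dedup pool).filter (fun s => decide (2 ≤ PySem.List.count pool s))
  (reads.foldl
    (fun (st : List String × PySem.Set String) read =>
      if correct.contains read then st
      else
        let neighbours := correct.filter (fun c => pvOneSubB c read)
        if neighbours.length = 1 then
          let correction := read ++ "->" ++ PySem.List.pyGetD neighbours 0 ""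
          if PySem.Set.contains st.2 correction then st
          else (st.1 ++ [correction], PySem.Set.add st.2 correction)
        else st)
    ([], PySem.Set.empty)).1

-- ===== PRECONDITION & SPEC =====
def Spec_correct_errors_efficient (reads : List String) (out : List String) : Prop := out = correct_errors_efficient_alt reads
instance (reads : List String) (out : List String) : Decidable (Spec_correct_errors_efficient reads out) := by unfold Spec_correct_errors_efficient; infer_instance

-- ===== CLAIM (what is proved, stated in full; the proofs are below) =====
def Claim_equal_correct_errors_efficient : Prop := ∀ (reads : List String), Dom_correct_errors_efficient reads → Spec_correct_errors_efficient reads (correct_errors_efficient reads)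


-- ===== LEMMAS AND PROOFS =====

-- proof-side names for the stages shared by the two ports ------------------

def pvPool (reads : List String) : List String :=
  reads.flatMap (fun read => [read, pvRcB read])

def pvCorrectList (reads : List String) : List String :=
  (PySem.List.dedup (pvPool reads)).filter (fun s => decide (2 ≤ PySem.List.count (pvPool reads) s))

def pvPairs (correct : List String) : List (String × String) :=
  correct.flatMap (fun c =>
    (PySem.List.pyRange 0 (PySem.Str.len c) 1).flatMap (fun i =>
      (pvACGT.filter (fun b => decide (PySem.List.pyGetD c.toList i ' ' ≠ b))).map
        (fun b => (pvMutA c.toList i b, c))))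

-- "r is c with position k substituted": the condition both ports decide
def pvQ (cl rl : List Char) (k : Nat) : Bool :=
  decide (rl.length = cl.length) && decide (rl.take k = cl.take k) &&
  decide (rl.drop (k + 1) = cl.drop (k + 1)) && (cl.getD k ' ' != rl.getD k ' ') &&
  pvACGT.contains (rl.getD k ' ')

-- small generic list facts -------------------------------------------------

theorem pv_foldl_pair {α β δ : Type} (f g : α → β) (upd : δ → β → δ) :
    ∀ (l : List α) (d : δ),
      l.foldl (fun d x => upd (upd d (f x)) (g x)) d = (l.flatMap (fun x => [f x, g x])).foldl upd d := by
  intro l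
  induction l with
  | nil => intro d; rfl
  | cons x t ih =>
    intro d
    simp only [List.foldl_cons, List.flatMap_cons, List.cons_append, List.nil_append,
      ih]

theorem pv_foldl_flatMap {α β δ : Type} (f : α → List β) (g : δ → β → δ) :
    ∀ (l : List α) (d : δ),
      l.foldl (fun d x => (f x).foldl g d) d = (l.flatMap f).foldl g d := by
  intro l
  induction l with
  | nil => intro d; rfl
  | cons x t ih => intro d; simp only [List.foldl_cons, List.flatMap_cons, List.foldl_append, ih]

theorem pv_flatMap_if {α : Type} (p : α → Bool) :
    ∀ l : List α, l.flatMap (fun x => if p x then [x] else []) = l.filter p := by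
  intro l
  induction l with
  | nil => rfl
  | cons x t ih => by_cases h : p x <;> simp [List.flatMap_cons, ih, h]

theorem pv_flatMap_congr_mem {α β : Type} {l : List α} {f g : α → List β}
    (h : ∀ a ∈ l, f a = g a) : l.flatMap f = l.flatMap g := by
  induction l with
  | nil => rfl
  | cons x t ih =>
    simp only [List.flatMap_cons, h x (by simp), ih (fun a ha => h a (by simp [ha]))]

theorem pv_any_congr_mem {α : Type} {l : List α} {p q : α → Bool}
    (h : ∀ a ∈ l, p a = q a) : l.any p = l.any q := by
  induction l with
  | nil => rfl
  | cons x t ih =>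
    simp only [List.any_cons, h x (by simp), ih (fun a ha => h a (by simp [ha]))]

theorem pv_filter_eq_of_unique {α : Type} [DecidableEq α]
    (p : α → Bool) (v : α) (h : ∀ b, p b = true → b = v) :
    ∀ l : List α, l.Nodup → l.filter p = if v ∈ l ∧ p v = true then [v] else [] := by
  intro l
  induction l with
  | nil => intro _; simp
  | cons x t ih =>
    intro hnd
    rcases List.nodup_cons.mp hnd with ⟨hx, ht⟩
    by_cases hpx : p x = true
    · have hxv : x = v := h x hpx
      subst hxv
      have htnil : t.filter p = [] := by
        rw [List.filter_eq_nil_iff]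
        intro a ha hpa
        exact hx ((h a hpa) ▸ ha)
      simp [hpx, htnil]
    · rw [List.filter_cons_of_neg (by simpa using hpx), ih ht]
      by_cases hvt : v ∈ t ∧ p v = true
      · simp only [hvt]
        have : v ∈ x :: t ∧ p v = true := ⟨List.mem_cons_of_mem x hvt.1, hvt.2⟩
        simp [this]
      · have hnot : ¬ (v ∈ x :: t ∧ p v = true) := by
          rintro ⟨hv, hpv⟩
          rcases List.mem_cons.mp hv with rfl | hv'
          · exact hpx hpv
          · exact hvt ⟨hv', hpv⟩
        simp only [hvt, if_false, hnot, if_false]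

theorem pv_range_flatMap_unique {α : Type} (x : α) (p : Nat → Bool) :
    ∀ m : Nat, (∀ j k, j < m → k < m → p j = true → p k = true → j = k) →
      (List.range m).flatMap (fun k => if p k then [x] else [])
        = if (List.range m).any p then [x] else [] := by
  intro m
  induction m with
  | zero => intro _; simp
  | succ n ih =>
    intro hu
    rw [List.range_succ, List.flatMap_append, List.any_append,
      ih (fun j k hj hk => hu j k (by omega) (by omega))]
    by_cases hpn : p n = true
    · have hall : (List.range n).any p = false := by
        rw [List.any_eq_false]
        intro j hj
        have hj' : j < n := List.mem_range.mp hj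
        intro hpj
        have := hu j n (by omega) (by omega) hpj hpn
        omega
      simp [hall, hpn]
    · simp [hpn]

theorem pv_ofList_eq_iff (l : List Char) (s : String) :
    String.ofList l = s ↔ l = s.toList := by
  constructor
  · intro h; simpa [String.toList_ofList] using congrArg String.toList h
  · rintro rfl; exact String.ofList_toList

-- reverse complement: the two ports agree ---------------------------------

theorem pv_trans_eq (c : Char) : pvCompB.getD c c = pvTransA c := by
  by_cases h1 : c = 'A'
  · subst h1; decide
  by_cases h2 : c = 'C'
  · subst h2; decide
  by_cases h3 : c = 'G'
  · subst h3; decide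
  by_cases h4 : c = 'T'
  · subst h4; decide
  unfold pvTransA
  simp only [h1, h2, h3, h4, if_false]
  have hd : pvCompB = PySem.Dict.mk [('A', 'T'), ('C', 'G'), ('G', 'C'), ('T', 'A')] := by decide
  rw [PySem.Dict.getD_eq_get?_getD, hd]
  simp only [PySem.Dict.get?_mk_cons, beq_iff_eq]
  rw [if_neg (fun h => h1 h.symm), if_neg (fun h => h2 h.symm),
    if_neg (fun h => h3 h.symm), if_neg (fun h => h4 h.symm)]
  rfl

theorem pv_rc_eq (s : String) : reverse_complementA s = pvRcB s := by
  unfold reverse_complementA pvRcB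
  rw [List.map_reverse]
  simp only [pv_trans_eq]

-- the frequency stage ------------------------------------------------------

theorem pv_freq_eq (reads : List String) :
    pvFreqA reads = PySem.Dict.counter (pvPool reads) := by
  unfold pvFreqA pvPool PySem.Dict.counter
  simp only [← pv_rc_eq]
  exact pv_foldl_pair (fun r => r) reverse_complementA
    (fun (d : PySem.Dict String Int) b => d.modify b 0 (· + 1)) reads PySem.Dict.empty

theorem pv_correct_eq (reads : List String) : pvCorrectA reads = pvCorrectList reads := by
  unfold pvCorrectA pvCorrectList
  rw [pv_freq_eq, PySem.Dict.items_counter, List.filter_map, List.map_map,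
    PySem.List.dedup_eq_ofList]
  have hmapid : (Prod.fst ∘ fun k : String => (k, (List.count k (pvPool reads) : Int)))
      = fun (k : String) => k := rfl
  rw [hmapid, List.map_id']
  have hpred : ∀ s ∈ PySem.Set.ofList (pvPool reads),
      ((fun p : String × Int => decide ((2 : Int) ≤ p.2)) ∘
          fun k : String => (k, (List.count k (pvPool reads) : Int))) s
        = decide (2 ≤ PySem.List.count (pvPool reads) s) := by
    intro s _
    have h1 : ((2 : Int) ≤ (List.count s (pvPool reads) : Int)) ↔
        2 ≤ PySem.List.count (pvPool reads) s := by
      rw [PySem.List.count_eq]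
      exact_mod_cast Iff.rfl
    simp only [Function.comp]
    exact decide_eq_decide.mpr h1
  rw [List.filter_congr hpred]
  exact PySem.Set.ofList_eq_self_of_nodup _
    ((PySem.Set.nodup_ofList (pvPool reads)).filter _)

theorem pv_correct_nodup (reads : List String) : (pvCorrectList reads).Nodup := by
  unfold pvCorrectList
  rw [PySem.List.dedup_eq_ofList]
  exact (PySem.Set.nodup_ofList (pvPool reads)).filter _

-- the mutation map ---------------------------------------------------------

theorem pv_mutMap_eq (correct : List String) :
    pvMutMapA correct
      = (pvPairs correct).foldl (fun d p => d.modify p.1 [] (· ++ [p.2])) PySem.Dict.empty := by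
  unfold pvMutMapA pvPairs
  rw [← pv_foldl_flatMap]
  have hstep : ∀ (d : PySem.Dict String (List String)) (c : String),
      (PySem.List.pyRange 0 (PySem.Str.len c) 1).foldl
        (fun d i =>
          pvACGT.foldl
            (fun d base =>
              if PySem.List.pyGetD c.toList i ' ' ≠ base then
                d.modify (pvMutA c.toList i base) [] (· ++ [c])
              else d)
            d)
        d
      = ((PySem.List.pyRange 0 (PySem.Str.len c) 1).flatMap (fun i =>
          (pvACGT.filter (fun b => decide (PySem.List.pyGetD c.toList i ' ' ≠ b))).map
            (fun b => (pvMutA c.toList i b, c)))).foldl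
          (fun d p => d.modify p.1 [] (· ++ [p.2])) d := by
    intro d c
    rw [← pv_foldl_flatMap]
    congr 1
    funext d i
    rw [PySem.List.foldl_ite_eq_foldl_filter
      (fun base => PySem.List.pyGetD c.toList i ' ' ≠ base)
      (fun d base => d.modify (pvMutA c.toList i base) [] (· ++ [c])) pvACGT d]
    rw [List.foldl_map]
  congr 1
  funext d c
  exact hstep d c

-- substitution characterisation -------------------------------------------

theorem pv_subst_eq_iff (cl rl : List Char) (k : Nat) (hk : k < cl.length) (b : Char) :
    cl.take k ++ b :: cl.drop (k + 1) = rl ↔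
      (rl.length = cl.length ∧ rl.take k = cl.take k ∧ rl[k]? = some b
        ∧ rl.drop (k + 1) = cl.drop (k + 1)) := by
  have hlt : (cl.take k).length = k := by
    simp [List.length_take]; omega
  constructor
  · rintro rfl
    refine ⟨?_, ?_, ?_, ?_⟩
    · simp only [List.length_append, List.length_cons, List.length_drop, hlt]; omega
    · rw [List.take_append_of_le_length (by omega), List.take_take]
      simp
    · rw [List.getElem?_append_right (by omega)]
      simp [hlt]
    · have h1 : k + 1 = (cl.take k).length + 1 := by omega
      rw [h1, List.drop_append]
      simp
  · rintro ⟨h1, h2, h3, h4⟩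
    have hk' : k < rl.length := by omega
    have hb : rl[k] = b := by
      have hsome : rl[k]? = some rl[k] := List.getElem?_eq_getElem hk'
      rw [hsome] at h3
      exact Option.some_inj.mp h3
    calc cl.take k ++ b :: cl.drop (k + 1)
        = rl.take k ++ rl[k] :: rl.drop (k + 1) := by rw [h2, h4, hb]
      _ = rl.take k ++ rl.drop k := by rw [← List.drop_eq_getElem_cons hk']
      _ = rl := List.take_append_drop k rl

theorem pvQ_unique (cl rl : List Char) :
    ∀ j k, j < cl.length → k < cl.length → pvQ cl rl j = true → pvQ cl rl k = true → j = k := by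
  have key : ∀ j k, j < k → k < cl.length → pvQ cl rl j = true → pvQ cl rl k = true → False := by
    intro j k hjk hk hqj hqk
    unfold pvQ at hqj hqk
    simp only [Bool.and_eq_true, decide_eq_true_eq, bne_iff_ne, ne_eq] at hqj hqk
    obtain ⟨⟨⟨⟨hlenj, _⟩, _⟩, hnej⟩, _⟩ := hqj
    obtain ⟨⟨⟨⟨_, htakek⟩, _⟩, _⟩, _⟩ := hqk
    have hj' : j < rl.length := by omega
    have h5 : (rl.take k).getD j ' ' = (cl.take k).getD j ' ' := by rw [htakek]
    have h6 : (rl.take k).getD j ' ' = rl.getD j ' ' := by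
      rw [List.getD_eq_getElem _ ' ' (by simp [List.length_take]; omega),
        List.getD_eq_getElem _ ' ' hj']
      exact List.getElem_take
    have h7 : (cl.take k).getD j ' ' = cl.getD j ' ' := by
      rw [List.getD_eq_getElem _ ' ' (by simp [List.length_take]; omega),
        List.getD_eq_getElem _ ' ' (by omega)]
      exact List.getElem_take
    exact hnej (by rw [← h7, ← h5, h6])
  intro j k hj hk hqj hqk
  rcases lt_trichotomy j k with h | h | h
  · exact (key j k h hk hqj hqk).elim
  · exact h
  · exact (key k j h hj hqk hqj).elim

-- the per-correct-read inner characterisation ------------------------------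

theorem pv_inner_eq (c r : String) :
    List.map (fun p : String × String => p.2)
      (List.filter (fun p => p.1 == r)
        ((PySem.List.pyRange 0 (PySem.Str.len c) 1).flatMap (fun i =>
          (pvACGT.filter (fun b => decide (PySem.List.pyGetD c.toList i ' ' ≠ b))).map
            (fun b => (pvMutA c.toList i b, c)))))
      = if pvOneSubB c r then [c] else [] := by
  rw [List.filter_flatMap, List.map_flatMap, PySem.Str.len_eq, PySem.List.pyRange_zero,
    Int.toNat_natCast, List.flatMap_map]
  have key : ∀ k ∈ List.range c.toList.length,
      List.map (fun p : String × String => p.2)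
        (List.filter (fun p => p.1 == r)
          ((pvACGT.filter (fun b => decide (PySem.List.pyGetD c.toList (k : Int) ' ' ≠ b))).map
            (fun b => (pvMutA c.toList (k : Int) b, c))))
        = if pvQ c.toList r.toList k then [c] else [] := by
    intro k hkmem
    have hk : k < c.toList.length := List.mem_range.mp hkmem
    rw [List.filter_map, List.map_map]
    rw [List.filter_filter]
    have hmut : ∀ b : Char, pvMutA c.toList (k : Int) b = r ↔
        (r.toList.length = c.toList.length ∧ r.toList.take k = c.toList.take k ∧
          r.toList[k]? = some b ∧ r.toList.drop (k + 1) = c.toList.drop (k + 1)) := by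
      intro b
      unfold pvMutA
      rw [PySem.List.slice_to_natCast]
      have hcast : ((k : Int) + 1) = ((k + 1 : Nat) : Int) := by push_cast; ring
      rw [hcast, PySem.List.slice_from_natCast]
      rw [pv_ofList_eq_iff]
      rw [List.append_assoc, List.singleton_append]
      exact pv_subst_eq_iff c.toList r.toList k hk b
    set v : Char := r.toList.getD k ' ' with hv
    have huniq : ∀ b : Char,
        (((fun p : String × String => p.1 == r) ∘ fun b => (pvMutA c.toList (k : Int) b, c)) b
          && decide (PySem.List.pyGetD c.toList (k : Int) ' ' ≠ b)) = true → b = v := by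
      intro b hb
      simp only [Function.comp, Bool.and_eq_true, beq_iff_eq, decide_eq_true_eq] at hb
      obtain ⟨hmeq, _⟩ := hb
      obtain ⟨hlen, _, hsome, _⟩ := (hmut b).mp hmeq
      have hk' : k < r.toList.length := by omega
      rw [List.getElem?_eq_getElem hk'] at hsome
      rw [hv, List.getD_eq_getElem r.toList ' ' hk']
      exact (Option.some_inj.mp hsome).symm
    rw [pv_filter_eq_of_unique _ v huniq pvACGT (by decide)]
    have hcond : (v ∈ pvACGT ∧
        (((fun p : String × String => p.1 == r) ∘ fun b => (pvMutA c.toList (k : Int) b, c)) v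
          && decide (PySem.List.pyGetD c.toList (k : Int) ' ' ≠ v)) = true)
        ↔ pvQ c.toList r.toList k = true := by
      unfold pvQ
      simp only [Function.comp, Bool.and_eq_true, beq_iff_eq, decide_eq_true_eq,
        bne_iff_ne, ne_eq, List.contains_iff_mem, PySem.List.pyGetD_natCast]
      constructor
      · rintro ⟨hvmem, hmeq, hne⟩
        obtain ⟨hlen, htake, _, hdrop⟩ := (hmut v).mp hmeq
        exact ⟨⟨⟨⟨hlen, htake⟩, hdrop⟩, hne⟩, hvmem⟩
      · rintro ⟨⟨⟨⟨hlen, htake⟩, hdrop⟩, hne⟩, hvmem⟩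
        have hk' : k < r.toList.length := by omega
        refine ⟨hvmem, (hmut v).mpr ⟨hlen, htake, ?_, hdrop⟩, hne⟩
        rw [List.getElem?_eq_getElem hk', hv, List.getD_eq_getElem r.toList ' ' hk']
    by_cases hq : pvQ c.toList r.toList k = true
    · rw [if_pos (hcond.mpr hq), hq]
      simp
    · rw [if_neg (fun hc => hq (hcond.mp hc))]
      simp [hq]
  rw [pv_flatMap_congr_mem key]
  rw [pv_range_flatMap_unique c (pvQ c.toList r.toList) c.toList.length
    (pvQ_unique c.toList r.toList)]
  have hany : pvOneSubB c r = (List.range c.toList.length).any (pvQ c.toList r.toList) := by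
    unfold pvOneSubB
    rw [PySem.Str.len_eq, PySem.Str.len_eq]
    by_cases hlen : r.toList.length = c.toList.length
    · have hlen' : (c.toList.length : Int) = (r.toList.length : Int) := by exact_mod_cast hlen.symm
      rw [if_neg (not_not_intro hlen')]
      rw [PySem.List.pyRange_zero, Int.toNat_natCast, List.any_map]
      apply pv_any_congr_mem
      intro k hkmem
      have hk : k < c.toList.length := List.mem_range.mp hkmem
      have hk' : k < r.toList.length := by omega
      simp only [Function.comp]
      rw [PySem.List.slice_to_natCast, PySem.List.slice_to_natCast]
      have hcast : ((k : Int) + 1) = ((k + 1 : Nat) : Int) := by push_cast; ring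
      rw [hcast, PySem.List.slice_from_natCast, PySem.List.slice_from_natCast]
      unfold pvQ pvACGT
      rw [Bool.eq_iff_iff]
      simp only [Bool.and_eq_true, beq_iff_eq, decide_eq_true_eq, bne_iff_ne, ne_eq,
        List.contains_iff_mem, PySem.List.pyGetD_natCast]
      constructor
      · rintro ⟨⟨⟨htake, hne⟩, hmem⟩, hdrop⟩
        exact ⟨⟨⟨⟨hlen, htake.symm⟩, hdrop.symm⟩, hne⟩, hmem⟩
      · rintro ⟨⟨⟨⟨_, htake⟩, hdrop⟩, hne⟩, hmem⟩
        exact ⟨⟨⟨htake.symm, hne⟩, hmem⟩, hdrop.symm⟩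
    · have hne' : ¬ ((c.toList.length : Int) = (r.toList.length : Int)) := by
        intro h
        exact hlen (by exact_mod_cast h.symm)
      rw [if_pos hne']
      have hqf : ∀ k, pvQ c.toList r.toList k = false := by
        intro k
        unfold pvQ
        rw [decide_eq_false hlen, Bool.false_and, Bool.false_and, Bool.false_and,
          Bool.false_and]
      rw [eq_comm, List.any_eq_false]
      intro k _
      simp [hqf k]
  rw [hany]

theorem pv_pairs_filter (correct : List String) (r : String) :
    ((pvPairs correct).filter (fun p => p.1 == r)).map (fun p : String × String => p.2)
      = correct.filter (fun c => pvOneSubB c r) := by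
  unfold pvPairs
  rw [List.filter_flatMap, List.map_flatMap, ← pv_flatMap_if (fun c => pvOneSubB c r)]
  exact pv_flatMap_congr_mem (fun c _ => pv_inner_eq c r)

theorem pv_mutMap_getD (correct : List String) (r : String) :
    (pvMutMapA correct).getD r [] = correct.filter (fun c => pvOneSubB c r) := by
  rw [pv_mutMap_eq, PySem.Dict.getD_foldl_modify_append, PySem.Dict.getD_empty,
    List.nil_append, pv_pairs_filter]

theorem pv_mutMap_contains (correct : List String) (r : String) :
    (pvMutMapA correct).contains r = true ↔ correct.filter (fun c => pvOneSubB c r) ≠ [] := by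
  rw [pv_mutMap_eq, PySem.Dict.contains_iff_mem_keys]
  have hkeys : ((pvPairs correct).foldl (fun d p => d.modify p.1 [] (· ++ [p.2]))
        (PySem.Dict.empty : PySem.Dict String (List String))).keys
      = PySem.Set.ofList ((pvPairs correct).map Prod.fst) := by
    rw [PySem.Dict.keys_foldl_modify_key (pvPairs correct) Prod.fst []
      (fun _ p => (· ++ [p.2])) PySem.Dict.empty]
    rw [PySem.Dict.keys_empty, PySem.Set.update_nil_left]
  rw [hkeys, PySem.Set.mem_ofList, List.mem_map]
  constructor
  · rintro ⟨p, hp, hfst⟩ hnil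
    rw [← pv_pairs_filter correct r] at hnil
    have : p ∈ (pvPairs correct).filter (fun p => p.1 == r) :=
      List.mem_filter.mpr ⟨hp, by simp [hfst]⟩
    rw [List.map_eq_nil_iff.mp hnil] at this
    exact List.not_mem_nil this
  · intro hne
    have hne' : (pvPairs correct).filter (fun p => p.1 == r) ≠ [] := by
      intro h
      apply hne
      rw [← pv_pairs_filter correct r, h]
      rfl
    rcases List.exists_mem_of_ne_nil _ hne' with ⟨p, hp⟩
    have hp' := List.mem_filter.mp hp
    exact ⟨p, hp'.1, by simpa using hp'.2⟩

-- ===== VERDICT (by name: the statement is the Claim_ definition above) =====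
theorem correct_errors_efficient_spec : Claim_equal_correct_errors_efficient := by
  intro reads _
  unfold Spec_correct_errors_efficient correct_errors_efficient correct_errors_efficient_alt
  have hpool : reads.flatMap (fun read => [read, pvRcB read]) = pvPool reads := rfl
  have hcor : pvCorrectA reads = pvCorrectList reads := pv_correct_eq reads
  have hset : PySem.Set.ofList (pvCorrectList reads) = pvCorrectList reads :=
    PySem.Set.ofList_eq_self_of_nodup _ (pv_correct_nodup reads)
  have hcorB : (PySem.List.dedup (pvPool reads)).filter
      (fun s => decide (2 ≤ PySem.List.count (pvPool reads) s)) = pvCorrectList reads := rfl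
  simp only [hpool, hcor, hset, hcorB]
  congr 1
  congr 1
  funext st read
  set L := pvCorrectList reads with hL
  rw [PySem.Set.contains_eq_listContains]
  by_cases hmem : L.contains read = true
  · simp only [hmem, if_true]
  · simp only [hmem, Bool.false_eq_true, if_false]
    have hvalid : List.foldl
        (fun acc corr =>
          if (PySem.Set.contains L corr
              || PySem.Set.contains L (reverse_complementA corr)) = true then
            acc ++ [corr]
          else acc)
        [] ((pvMutMapA L).getD read [])
        = List.filter (fun c => pvOneSubB c read) L := by
      rw [pv_mutMap_getD,
        PySem.List.foldl_append_if_eq_filter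
          (fun corr => PySem.Set.contains L corr
            || PySem.Set.contains L (reverse_complementA corr))
          (L.filter (fun c => pvOneSubB c read)) [], List.nil_append]
      rw [List.filter_eq_self]
      intro a ha
      have haL : a ∈ L := (List.mem_filter.mp ha).1
      simp [PySem.Set.contains_eq_listContains, haL]
    by_cases hct : (pvMutMapA L).contains read = true
    · simp only [hct, if_true, hvalid]
    · have hnil : L.filter (fun c => pvOneSubB c read) = [] := by
        by_contra h
        exact hct ((pv_mutMap_contains L read).mpr h)
      simp only [hct, Bool.false_eq_true, if_false, hnil]
      simp
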